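-- pv_equiv track=rewrite | github.com/lookitsliao/bench-cleanser | scripts/v3_forensic_analysis.py | analyze_cooccurrence
-- ===== SOURCE A (Python) =====
-- from collections import Counter, defaultdict
-- from itertools import combinations
--
-- def extract_labels(report: dict) -> list[str]:
--     """Extract label strings from a report."""
--     return [la["label"] for la in report.get("task_labels", [])]
--
-- def analyze_cooccurrence(reports: list[dict]) -> dict:
--     """Build label co-occurrence matrix."""
--     pair_counts = Counter()
--     label_set_counts = Counter()
--
--     for r in reports:
--         labels = extract_labels(r)
--         contam_labels = [l for l in labels if l != "clean"]
--         label_set_counts[tuple(sorted(contam_labels))] += 1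
--         for a, b in combinations(sorted(set(contam_labels)), 2):
--             pair_counts[(a, b)] += 1
--
--     return {
--         "pair_counts": {f"{a} + {b}": c for (a, b), c in pair_counts.most_common(30)},
--         "common_label_sets": {
--             " | ".join(k) if k else "(clean)": v
--             for k, v in label_set_counts.most_common(20)
--         },
--     }
-- ===== SOURCE B (Python) =====
-- from collections import Counter
-- from itertools import combinations
--
-- def analyze_cooccurrence(reports):
--     """Build label co-occurrence matrix (aggregate per distinct label set)."""
--     label_set_counts = Counter(
--         tuple(sorted(la["label"] for la in r.get("task_labels", [])
--                      if la["label"] != "clean"))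
--         for r in reports
--     )
--     pair_counts = Counter()
--     for key, freq in label_set_counts.items():
--         for pair in combinations(dict.fromkeys(key), 2):
--             pair_counts[pair] += freq
--
--     def _top(counter, n, fmt):
--         return {fmt(k): v for k, v in counter.most_common(n)}
--
--     return {
--         "pair_counts": _top(pair_counts, 30, lambda p: f"{p[0]} + {p[1]}"),
--         "common_label_sets": _top(label_set_counts, 20,
--                                   lambda k: " | ".join(k) if k else "(clean)"),
--     }
-- ===== Notes on version B (the rewrite author's own statement) =====
-- stated objective: alternative
-- what changed: B counts each distinct sorted label-set once with a single Counter built from a generator, then derives pair co-occurrence counts by expanding pairs per unique label set weighted by its frequency, instead of A's per-report pair loop; formatting goes through one shared _top helper.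
import Mathlib
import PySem

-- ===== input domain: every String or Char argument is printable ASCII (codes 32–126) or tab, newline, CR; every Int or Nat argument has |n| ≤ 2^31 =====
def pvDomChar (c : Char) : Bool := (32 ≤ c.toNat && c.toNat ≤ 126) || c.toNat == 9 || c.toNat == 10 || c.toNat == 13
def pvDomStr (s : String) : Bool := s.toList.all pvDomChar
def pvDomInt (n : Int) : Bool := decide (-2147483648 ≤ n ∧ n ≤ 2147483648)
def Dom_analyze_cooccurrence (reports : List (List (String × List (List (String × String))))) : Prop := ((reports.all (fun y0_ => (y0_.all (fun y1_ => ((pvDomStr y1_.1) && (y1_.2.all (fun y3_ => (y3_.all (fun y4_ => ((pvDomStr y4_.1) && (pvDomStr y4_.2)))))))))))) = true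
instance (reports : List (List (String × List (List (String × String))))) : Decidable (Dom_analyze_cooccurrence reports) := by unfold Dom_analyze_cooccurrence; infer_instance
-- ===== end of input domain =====

-- B aggregates pair counts per distinct label set (weighted by its frequency) instead of per report; same return value, alternative decomposition.

-- ===== PORT A =====
-- extract_labels(r): la["label"] would raise KeyError on a missing key; Pre_ excludes that, so getD "label" "" is exact inside Pre_.
def pvExtractLabels (report : List (String × List (List (String × String)))) : List String :=
  ((PySem.Dict.mk report).getD "task_labels" []).map (fun la => (PySem.Dict.mk la).getD "label" "")

-- tuple unpacking 'a, b' of one 2-element combination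
def pvPair (l : List String) : String × String := (l.getD 0 "", l.getD 1 "")

-- Counter.most_common(n) = heapq.nlargest(n, items, key=itemgetter(1)) = stable descending sort by count, take n (used by both ports)
def pvMostCommon {κ : Type} (d : PySem.Dict κ Int) (n : Nat) : List (κ × Int) :=
  (PySem.List.sorted d.items (fun p => p.2) true).take n

def analyze_cooccurrence (reports : List (List (String × List (List (String × String))))) : List (String × List (String × Int)) :=
  let st := reports.foldl
    (fun (st : PySem.Dict (String × String) Int × PySem.Dict (List String) Int) r =>
      (((PySem.List.combinations (PySem.List.sorted (PySem.Set.ofList ((pvExtractLabels r).filter (fun l => !(l == "clean")))) (fun x => x)) 2).map pvPair).foldl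
          (fun d ab => d.modify ab 0 (· + 1)) st.1,
       st.2.modify (PySem.List.sorted ((pvExtractLabels r).filter (fun l => !(l == "clean"))) (fun x => x)) 0 (· + 1)))
    (PySem.Dict.empty, PySem.Dict.empty)
  [("pair_counts",
    ((pvMostCommon st.1 30).foldl (fun acc p => acc.insert (p.1.1 ++ " + " ++ p.1.2) p.2) PySem.Dict.empty).items),
   ("common_label_sets",
    ((pvMostCommon st.2 20).foldl (fun acc p => acc.insert (if p.1.isEmpty then "(clean)" else PySem.Str.join " | " p.1) p.2) PySem.Dict.empty).items)]

-- ===== PORT B =====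
-- the Counter(...) generator argument: sorted label list of one report (filter, then map, then sort)
def pvLabelSet (r : List (String × List (List (String × String)))) : List String :=
  PySem.List.sorted
    ((((PySem.Dict.mk r).getD "task_labels" []).filter
        (fun la => !((PySem.Dict.mk la).getD "label" "" == "clean"))).map
      (fun la => (PySem.Dict.mk la).getD "label" ""))
    (fun x => x)

-- _top(counter, n, fmt)
def pvTop {κ : Type} [BEq κ] (d : PySem.Dict κ Int) (n : Nat) (fmt : κ → String) : List (String × Int) :=
  ((pvMostCommon d n).foldl (fun acc p => acc.insert (fmt p.1) p.2) PySem.Dict.empty).items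

def analyze_cooccurrence_alt (reports : List (List (String × List (List (String × String))))) : List (String × List (String × Int)) :=
  let label_set_counts := PySem.Dict.counter (reports.map pvLabelSet)
  let pair_counts := label_set_counts.items.foldl
    (fun d kf => ((PySem.List.combinations (PySem.List.dedup kf.1) 2).map pvPair).foldl
        (fun d p => d.modify p 0 (· + kf.2)) d)
    PySem.Dict.empty
  [("pair_counts", pvTop pair_counts 30 (fun p => p.1 ++ " + " ++ p.2)),
   ("common_label_sets", pvTop label_set_counts 20 (fun k => if k.isEmpty then "(clean)" else PySem.Str.join " | " k))]

-- ===== PRECONDITION & SPEC =====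
-- Pre_ excludes exactly the inputs where A raises KeyError: some task_labels entry lacks the "label" key.
def Pre_analyze_cooccurrence (reports : List (List (String × List (List (String × String))))) : Prop :=
  ∀ r ∈ reports, ∀ la ∈ (PySem.Dict.mk r).getD "task_labels" [], (PySem.Dict.mk la).contains "label" = true
instance (reports : List (List (String × List (List (String × String))))) : Decidable (Pre_analyze_cooccurrence reports) := by unfold Pre_analyze_cooccurrence; infer_instance

def pvWitness_analyze_cooccurrence : (List (List (String × List (List (String × String))))) :=
  [[("task_labels", [[("label", "dup")], [("label", "leak")], [("label", "clean")]])],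
   [("task_labels", [[("label", "leak")], [("label", "dup")]])],
   []]

def Spec_analyze_cooccurrence (reports : List (List (String × List (List (String × String))))) (out : List (String × List (String × Int))) : Prop := out = analyze_cooccurrence_alt reports
instance (reports : List (List (String × List (List (String × String))))) (out : List (String × List (String × Int))) : Decidable (Spec_analyze_cooccurrence reports out) := by unfold Spec_analyze_cooccurrence; infer_instance

-- ===== CLAIM (what is proved, stated in full; the proofs are below) =====
def Claim_equal_analyze_cooccurrence : Prop := ∀ (reports : List (List (String × List (List (String × String))))), Dom_analyze_cooccurrence reports → Pre_analyze_cooccurrence reports → Spec_analyze_cooccurrence reports (analyze_cooccurrence reports)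

-- ===== LEMMAS AND PROOFS =====

-- proof-side abbreviation: the pair list generated from one label-set key
def pvPairsOf (S : List String) : List (String × String) :=
  (PySem.List.combinations (PySem.List.dedup S) 2).map pvPair

-- A's sorted contam list is B's pvLabelSet
theorem pvLabelSet_eq (r : List (String × List (List (String × String)))) :
    PySem.List.sorted ((pvExtractLabels r).filter (fun l => !(l == "clean"))) (fun x => x)
      = pvLabelSet r := by
  simp only [pvExtractLabels, pvLabelSet, List.filter_map]
  rfl

theorem pvOfListSublist {α : Type} [BEq α] [LawfulBEq α] (xs : List α) :
    (PySem.Set.ofList xs).Sublist xs := by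
  induction xs using List.reverseRecOn with
  | nil => exact List.Sublist.refl _
  | append_singleton xs x ih =>
    rw [PySem.Set.ofList_append_singleton]
    by_cases hx : x ∈ PySem.Set.ofList xs
    · rw [PySem.Set.add_of_mem hx]
      exact ih.trans (List.sublist_append_left _ _)
    · rw [PySem.Set.add_of_not_mem hx]
      exact List.Sublist.append ih (List.Sublist.refl _)

-- sorted(set(xs)) = dedup(sorted(xs)) for string lists
theorem pvSortedSet_eq (xs : List String) :
    PySem.List.sorted (PySem.Set.ofList xs) (fun x => x)
      = PySem.List.dedup (PySem.List.sorted xs (fun x => x)) := by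
  rw [PySem.List.dedup_eq_ofList]
  apply PySem.List.sorted_eq_of_perm_of_pairwise_lt
  · refine (List.perm_ext_iff_of_nodup (PySem.Set.nodup_ofList _) (PySem.Set.nodup_ofList _)).mpr ?_
    intro a
    simp [PySem.Set.mem_ofList, PySem.List.mem_sorted]
  · have hsub := pvOfListSublist (PySem.List.sorted xs (fun x => x))
    have hle := List.Pairwise.sublist hsub (PySem.List.sorted_pairwise xs (fun x => x))
    have hnd : List.Pairwise (fun (a b : String) => a ≠ b) (PySem.Set.ofList (PySem.List.sorted xs (fun x => x))) :=
      PySem.Set.nodup_ofList _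
    exact (hle.and hnd).imp (fun h => lt_of_le_of_ne h.1 h.2)

theorem pvUpdateId {α : Type} [BEq α] [LawfulBEq α] (l : List α) (s : PySem.Set α)
    (h : ∀ y ∈ l, y ∈ s) : PySem.Set.update s l = s := by
  induction l generalizing s with
  | nil => exact PySem.Set.update_nil s
  | cons x t ih =>
    rw [PySem.Set.update_cons, PySem.Set.add_of_mem (h x (by simp))]
    exact ih s (fun y hy => h y (by simp [hy]))

theorem pvOfListFlatMap {α β : Type} [BEq α] [LawfulBEq α] [BEq β] [LawfulBEq β]
    (f : α → List β) (xs : List α) :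
    PySem.Set.ofList (xs.flatMap f) = PySem.Set.ofList ((PySem.Set.ofList xs).flatMap f) := by
  induction xs using List.reverseRecOn with
  | nil => rfl
  | append_singleton xs x ih =>
    rw [List.flatMap_append, PySem.Set.ofList_append, PySem.Set.ofList_append_singleton]
    simp only [List.flatMap_cons, List.flatMap_nil, List.append_nil]
    by_cases hx : x ∈ PySem.Set.ofList xs
    · rw [PySem.Set.add_of_mem hx, ← ih]
      apply pvUpdateId
      intro y hy
      rw [PySem.Set.mem_ofList]
      exact List.mem_flatMap.mpr ⟨x, (PySem.Set.mem_ofList _ _).mp hx, hy⟩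
    · rw [PySem.Set.add_of_not_mem hx, List.flatMap_append, PySem.Set.ofList_append, ← ih]
      simp only [List.flatMap_cons, List.flatMap_nil, List.append_nil]

-- getD of a weighted counting fold
theorem pvWgetD {κ : Type} [BEq κ] [LawfulBEq κ] [DecidableEq κ]
    (l : List (κ × Int)) (d : PySem.Dict κ Int) (p : κ) :
    (l.foldl (fun d q => d.modify q.1 0 (· + q.2)) d).getD p 0
      = d.getD p 0 + ((l.filter (fun q => q.1 == p)).map (fun q => q.2)).sum := by
  induction l generalizing d with
  | nil => simp
  | cons q t ih =>
    simp only [List.foldl_cons, List.filter_cons]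
    rw [ih, PySem.Dict.getD_modify]
    by_cases h : q.1 = p
    · simp [h]
      omega
    · have hb : (q.1 == p) = false := by simp [h]
      have hp : ¬ (p = q.1) := fun hc => h hc.symm
      simp [hb, hp]

-- keys of the weighted counting fold from empty
theorem pvWkeys {κ : Type} [BEq κ] [LawfulBEq κ] (l : List (κ × Int)) :
    (l.foldl (fun d q => d.modify q.1 0 (· + q.2)) PySem.Dict.empty).keys
      = PySem.Set.ofList (l.map (fun q => q.1)) := by
  rw [PySem.Dict.keys_foldl_modify_key l (fun q => q.1) 0 (fun _ q => (· + q.2))]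
  rw [PySem.Dict.keys_empty]
  exact PySem.Set.update_nil_left _

theorem pvIND {α : Type} [DecidableEq α] (M : List α) (x : α) (c : α → Int)
    (hnd : M.Nodup) (hx : x ∈ M) :
    (M.map (fun S => if S = x then c S else 0)).sum = c x := by
  induction M with
  | nil => cases hx
  | cons S t ih =>
    rcases List.nodup_cons.mp hnd with ⟨hS, hnt⟩
    rcases List.mem_cons.mp hx with h | h
    · subst h
      have hz : (t.map (fun S' => if S' = x then c S' else 0)).sum = 0 := by
        apply List.sum_eq_zero
        intro y hy
        rcases List.mem_map.mp hy with ⟨S', hS', rfl⟩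
        rw [if_neg]
        intro he
        exact hS (by rw [← he]; exact hS')
      simp [hz]
    · simp only [List.map_cons, List.sum_cons]
      rw [if_neg (fun he => hS (by rw [he]; exact h)), ih hnt h]
      ring

theorem pvGRP {α : Type} [BEq α] [LawfulBEq α] [DecidableEq α] (L M : List α) (g : α → Int)
    (hnd : M.Nodup) (hsub : ∀ x ∈ L, x ∈ M) :
    (L.map g).sum = (M.map (fun S => (L.count S : Int) * g S)).sum := by
  induction L with
  | nil =>
    rw [List.map_nil, List.sum_nil]
    symm
    apply List.sum_eq_zero
    intro y hy
    rcases List.mem_map.mp hy with ⟨S, _, rfl⟩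
    simp
  | cons x t ih =>
    have ht : ∀ y ∈ t, y ∈ M := fun y hy => hsub y (List.mem_cons_of_mem _ hy)
    simp only [List.map_cons, List.sum_cons]
    rw [ih ht]
    have hcnt : ∀ S ∈ M, ((x :: t).count S : Int) * g S
        = (t.count S : Int) * g S + (if S = x then g S else 0) := by
      intro S _
      rw [List.count_cons]
      by_cases h : S = x
      · simp only [h, beq_self_eq_true]
        push_cast
        ring
      · have hb : (x == S) = false := by
          simp only [beq_eq_false_iff_ne]
          exact fun hc => h hc.symm
        simp only [hb, Bool.false_eq_true, if_false, if_neg h]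
        push_cast
        ring
    rw [List.map_congr_left hcnt, PySem.List.sum_map_add_int,
        pvIND M x g hnd (hsub x (by simp))]
    ring

-- sum of the per-key weights of a flatMap stream splits per generator element
theorem pvWsum {α κ : Type} [BEq κ] (l : List α) (h : α → List (κ × Int)) (p : κ) :
    (((l.flatMap h).filter (fun q => q.1 == p)).map (fun q => q.2)).sum
      = (l.map (fun S => (((h S).filter (fun q => q.1 == p)).map (fun q => q.2)).sum)).sum := by
  induction l with
  | nil => simp
  | cons x t ih =>
    simp only [List.flatMap_cons, List.filter_append, List.map_append, List.sum_append,
      List.map_cons, List.sum_cons, ih]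

-- the heart: A's per-report pair fold equals B's per-distinct-label-set weighted fold
theorem pvPairDict (L : List (List String)) :
    (L.flatMap pvPairsOf).foldl (fun d p => d.modify p 0 (· + 1)) PySem.Dict.empty
      = (PySem.Dict.counter L).items.foldl
          (fun d kf => (pvPairsOf kf.1).foldl (fun d p => d.modify p 0 (· + kf.2)) d)
          PySem.Dict.empty := by
  have hA : (L.flatMap pvPairsOf).foldl (fun d p => d.modify p 0 (· + 1)) PySem.Dict.empty
      = ((L.flatMap pvPairsOf).map (fun p => (p, (1 : Int)))).foldl
          (fun d q => d.modify q.1 0 (· + q.2)) PySem.Dict.empty := by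
    rw [List.foldl_map]
  have hB : (PySem.Dict.counter L).items.foldl
        (fun d kf => (pvPairsOf kf.1).foldl (fun d p => d.modify p 0 (· + kf.2)) d)
        PySem.Dict.empty
      = ((PySem.Set.ofList L).flatMap
            (fun S => (pvPairsOf S).map (fun p => (p, (L.count S : Int))))).foldl
          (fun d q => d.modify q.1 0 (· + q.2)) PySem.Dict.empty := by
    rw [PySem.Dict.items_counter, List.foldl_map, List.foldl_flatMap]
    simp only [List.foldl_map]
  rw [hA, hB]
  set SA := (L.flatMap pvPairsOf).map (fun p => (p, (1 : Int))) with hSA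
  set SB := (PySem.Set.ofList L).flatMap
      (fun S => (pvPairsOf S).map (fun p => (p, (L.count S : Int)))) with hSB
  have hkA : (SA.foldl (fun d q => d.modify q.1 0 (· + q.2)) PySem.Dict.empty).keys
      = PySem.Set.ofList (L.flatMap pvPairsOf) := by
    rw [pvWkeys]
    simp only [hSA, List.map_map]
    congr 1
    exact List.map_id' _
  have hkB : (SB.foldl (fun d q => d.modify q.1 0 (· + q.2)) PySem.Dict.empty).keys
      = PySem.Set.ofList ((PySem.Set.ofList L).flatMap pvPairsOf) := by
    rw [pvWkeys]
    simp only [hSB, List.map_flatMap, List.map_map]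
    congr 2
    funext S
    exact List.map_id' _
  have hkeys : (SA.foldl (fun d q => d.modify q.1 0 (· + q.2)) PySem.Dict.empty).keys
      = (SB.foldl (fun d q => d.modify q.1 0 (· + q.2)) PySem.Dict.empty).keys := by
    rw [hkA, hkB, pvOfListFlatMap]
  have hval : ∀ p, (SA.foldl (fun d q => d.modify q.1 0 (· + q.2)) PySem.Dict.empty).getD p 0
      = (SB.foldl (fun d q => d.modify q.1 0 (· + q.2)) PySem.Dict.empty).getD p 0 := by
    intro p
    rw [pvWgetD, pvWgetD]
    congr 1
    -- LHS stream: every entry weight 1; RHS stream: weight = multiplicity of the label set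
    have h1 : ((SA.filter (fun q => q.1 == p)).map (fun q => q.2)).sum
        = (L.map (fun S => ((((pvPairsOf S).filter (fun x => x == p)).length : Int)))).sum := by
      rw [hSA, List.filter_map, List.map_map]
      show (((L.flatMap pvPairsOf).filter (fun x => x == p)).map (fun _ => (1:Int))).sum
          = (L.map (fun S => ((((pvPairsOf S).filter (fun x => x == p)).length : Int)))).sum
      rw [PySem.List.sum_map_const_int, mul_one, List.filter_flatMap, List.length_flatMap]
      push_cast
      rw [List.map_map]
      rfl
    have h2 : ((SB.filter (fun q => q.1 == p)).map (fun q => q.2)).sum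
        = ((PySem.Set.ofList L).map (fun S => (L.count S : Int) *
            (((pvPairsOf S).filter (fun x => x == p)).length : Int))).sum := by
      rw [hSB, pvWsum]
      congr 1
      apply List.map_congr_left
      intro S _
      rw [List.filter_map, List.map_map]
      show (((pvPairsOf S).filter (fun x => x == p)).map (fun _ => ((L.count S : Int)))).sum
          = (L.count S : Int) * (((pvPairsOf S).filter (fun x => x == p)).length : Int)
      rw [PySem.List.sum_map_const_int]
      ring
    rw [h1, h2]
    rw [pvGRP L (PySem.Set.ofList L)
      (fun S => (((pvPairsOf S).filter (fun x => x == p)).length : Int))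
      (PySem.Set.nodup_ofList L) (fun x hx => (PySem.Set.mem_ofList L x).mpr hx)]
  have hndA : (SA.foldl (fun d q => d.modify q.1 0 (· + q.2)) PySem.Dict.empty).keys.Nodup := by
    rw [pvWkeys]; exact PySem.Set.nodup_ofList _
  have hndB : (SB.foldl (fun d q => d.modify q.1 0 (· + q.2)) PySem.Dict.empty).keys.Nodup := by
    rw [pvWkeys]; exact PySem.Set.nodup_ofList _
  apply PySem.Dict.ext
  rw [PySem.Dict.items_eq_map_keys _ hndA 0, PySem.Dict.items_eq_map_keys _ hndB 0, hkeys]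
  apply List.map_congr_left
  intro k _
  rw [hval k]

-- A's label_set_counts loop is Counter(generator)
theorem pvLscEq (reports : List (List (String × List (List (String × String))))) :
    reports.foldl
        (fun d r => d.modify
          (PySem.List.sorted ((pvExtractLabels r).filter (fun l => !(l == "clean"))) (fun x => x))
          0 (· + 1)) PySem.Dict.empty
      = PySem.Dict.counter (reports.map pvLabelSet) := by
  simp only [pvLabelSet_eq]
  rw [PySem.Dict.counter_eq_foldl, List.foldl_map]

-- A's pair_counts loop equals B's weighted loop over Counter items
theorem pvPcEq (reports : List (List (String × List (List (String × String))))) :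
    reports.foldl
        (fun d r => ((PySem.List.combinations
            (PySem.List.sorted (PySem.Set.ofList ((pvExtractLabels r).filter (fun l => !(l == "clean")))) (fun x => x)) 2).map pvPair).foldl
          (fun d ab => d.modify ab 0 (· + 1)) d) PySem.Dict.empty
      = (PySem.Dict.counter (reports.map pvLabelSet)).items.foldl
          (fun d kf => ((PySem.List.combinations (PySem.List.dedup kf.1) 2).map pvPair).foldl
            (fun d p => d.modify p 0 (· + kf.2)) d) PySem.Dict.empty := by
  have h1 : ∀ r : List (String × List (List (String × String))),
      (PySem.List.combinations
          (PySem.List.sorted (PySem.Set.ofList ((pvExtractLabels r).filter (fun l => !(l == "clean")))) (fun x => x)) 2).map pvPair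
        = pvPairsOf (pvLabelSet r) := by
    intro r
    rw [pvSortedSet_eq, pvLabelSet_eq]
    rfl
  simp only [h1]
  have hmapA : List.foldl (fun (d : PySem.Dict (String × String) Int) r => List.foldl (fun d ab => d.modify ab 0 (· + 1)) d (pvPairsOf (pvLabelSet r))) PySem.Dict.empty reports
      = List.foldl (fun (d : PySem.Dict (String × String) Int) S => List.foldl (fun d p => d.modify p 0 (· + 1)) d (pvPairsOf S)) PySem.Dict.empty (reports.map pvLabelSet) := by
    simp only [List.foldl_map]
  rw [hmapA]
  have hflat : List.foldl (fun (d : PySem.Dict (String × String) Int) S => List.foldl (fun d p => d.modify p 0 (· + 1)) d (pvPairsOf S)) PySem.Dict.empty (reports.map pvLabelSet)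
      = ((reports.map pvLabelSet).flatMap pvPairsOf).foldl (fun d p => d.modify p 0 (· + 1)) PySem.Dict.empty := by
    simp only [List.foldl_flatMap]
  rw [hflat]
  have h2 : ∀ kf : List String × Int,
      ((PySem.List.combinations (PySem.List.dedup kf.1) 2).map pvPair) = pvPairsOf kf.1 :=
    fun _ => rfl
  simp only [h2]
  exact pvPairDict (reports.map pvLabelSet)

-- ===== VERDICT (by name: the statement is the Claim_ definition above) =====
theorem analyze_cooccurrence_spec : Claim_equal_analyze_cooccurrence := by
  intro reports _ _
  unfold Spec_analyze_cooccurrence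
  show analyze_cooccurrence reports = analyze_cooccurrence_alt reports
  simp only [analyze_cooccurrence, analyze_cooccurrence_alt, pvTop]
  have hsplit : List.foldl
      (fun (st : PySem.Dict (String × String) Int × PySem.Dict (List String) Int) r =>
        (List.foldl (fun d ab => d.modify ab 0 (· + 1)) st.1
            ((PySem.List.combinations (PySem.List.sorted (PySem.Set.ofList ((pvExtractLabels r).filter (fun l => !(l == "clean")))) (fun x => x)) 2).map pvPair),
         st.2.modify (PySem.List.sorted ((pvExtractLabels r).filter (fun l => !(l == "clean"))) (fun x => x)) 0 (· + 1)))
      (PySem.Dict.empty, PySem.Dict.empty) reports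
      = (List.foldl (fun d r => List.foldl (fun d ab => d.modify ab 0 (· + 1)) d
            ((PySem.List.combinations (PySem.List.sorted (PySem.Set.ofList ((pvExtractLabels r).filter (fun l => !(l == "clean")))) (fun x => x)) 2).map pvPair)) PySem.Dict.empty reports,
         List.foldl (fun d r => d.modify (PySem.List.sorted ((pvExtractLabels r).filter (fun l => !(l == "clean"))) (fun x => x)) 0 (· + 1)) PySem.Dict.empty reports) :=
    PySem.List.foldl_prod_mk
      (fun (d : PySem.Dict (String × String) Int) r => List.foldl (fun d ab => d.modify ab 0 (· + 1)) d
        ((PySem.List.combinations (PySem.List.sorted (PySem.Set.ofList ((pvExtractLabels r).filter (fun l => !(l == "clean")))) (fun x => x)) 2).map pvPair))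
      (fun (d : PySem.Dict (List String) Int) r => d.modify (PySem.List.sorted ((pvExtractLabels r).filter (fun l => !(l == "clean"))) (fun x => x)) 0 (· + 1))
      reports PySem.Dict.empty PySem.Dict.empty
  rw [hsplit, pvLscEq, pvPcEq]
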